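-- pv_equiv track=rewrite | github.com/bunnybryna/Coursera_MIT_Intro_To_CS | Code/wk4codeGrader.py | nfruits
-- ===== SOURCE A (Python) =====
-- def nfruits(aDict,string):
--     '''aDict is a non-empty dictionary containing type of fruit and its quantity initially (len(aDict) < 10)
--     string is a string pattern of the fruits eaten by Python
--     nfruits returns the max quantity of fruits left when Python reached campus
--     '''
--     ls = len(string)
--     # use nested loop to compare the elements in a dictionary and a string
--     # ls-1 is to save the special case(the last one)for later
--     for i in range(ls-1):
--         letter = string[i]
--         for key in aDict:
--             # each time he consumes a fruit of one type
--             if  key == letter: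
--                 aDict[key] -= 1
--             # after that he buys a fruit of each other type
--             elif key != letter:
--                 aDict[key] += 1
--
--     # special case: only consumption and no ore purchase
--     lastLetter = string[ls-1]
--     aDict[lastLetter] -= 1
--
--     #  use .items() to find the max value
--     #  bigFruit is the key,bigCount is the value
--     # the other way:
--     # lst = aDict.values()
--     # lst.sort(reverse=True)
--     # print lst[0]
--     # or just max(aDict.values())
--     bigFruit = None
--     bigCount = None
--     for fruit,count in aDict.items():
--         if bigCount is None or count > bigCount:
--             bigFruit = fruit
--             bigCount = count
--     return bigCount
-- ===== SOURCE B (Python) =====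
-- def nfruits(aDict, string):
--     # Closed form: over the first len-1 letters, every key gains +1 per letter
--     # and an extra -2 whenever the letter equals that key; then the last
--     # letter costs one more fruit.  One tally pass instead of nested loops.
--     body = string[:-1]
--     eaten = {}
--     for c in body:
--         eaten[c] = eaten.get(c, 0) + 1
--     bonus = len(body)
--     for key in aDict:
--         aDict[key] += bonus - 2 * eaten.get(key, 0)
--     aDict[string[-1]] -= 1
--     return max(aDict.values())
-- ===== Notes on version B (the rewrite author's own statement) =====
-- stated objective: simpler
-- what changed: Replaces the nested letter-by-key loop with one tally pass over string[:-1] and a single closed-form update per key (initial + (len-1) - 2*eaten), and max(aDict.values()) instead of the hand-written max loop.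
import Mathlib
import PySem

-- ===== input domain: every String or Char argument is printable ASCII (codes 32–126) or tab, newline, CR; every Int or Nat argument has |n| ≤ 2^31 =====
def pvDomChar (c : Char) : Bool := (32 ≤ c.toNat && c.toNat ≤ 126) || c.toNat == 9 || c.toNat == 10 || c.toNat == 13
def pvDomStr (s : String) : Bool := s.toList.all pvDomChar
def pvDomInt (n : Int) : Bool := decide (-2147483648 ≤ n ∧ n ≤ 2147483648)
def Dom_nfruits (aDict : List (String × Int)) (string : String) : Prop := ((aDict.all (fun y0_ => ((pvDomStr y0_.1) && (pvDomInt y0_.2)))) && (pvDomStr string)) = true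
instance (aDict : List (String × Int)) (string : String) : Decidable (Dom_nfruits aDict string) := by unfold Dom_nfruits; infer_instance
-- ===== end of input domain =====

-- B replaces A's nested letter-by-key loop with one tally pass and a closed-form per-key update;
-- both Pythons mutate aDict to the same final state, the theorem is about the return value.

-- ===== PORT A =====
-- A's inner loop: for key in aDict: if key == letter: aDict[key] -= 1 else: aDict[key] += 1
def nfruitsInner (d : PySem.Dict String Int) (letter : Char) : PySem.Dict String Int :=
  d.keys.foldl (fun d k =>
    if k == String.singleton letter then d.modify k 0 (· - 1)
    else d.modify k 0 (· + 1)) d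

-- A's final loop: hand-written max over .items()
def nfruitsMaxLoop (items : List (String × Int)) : Option String × Option Int :=
  items.foldl (fun acc fc =>
    match acc.2 with
    | none => (some fc.1, some fc.2)
    | some b => if fc.2 > b then (some fc.1, some fc.2) else acc) (none, none)

def nfruits (aDict : List (String × Int)) (string : String) : Int :=
  let d0 : PySem.Dict String Int := PySem.Dict.mk aDict
  let chars := string.toList
  let ls := chars.length
  let d1 := (chars.take (ls - 1)).foldl nfruitsInner d0
  match PySem.List.pyGet? chars ((ls : Int) - 1) with
  | none => 0          -- IndexError (empty string); excluded by Pre_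
  | some lastLetter =>
    if d1.contains (String.singleton lastLetter) then
      let d2 := d1.modify (String.singleton lastLetter) 0 (· - 1)
      (nfruitsMaxLoop d2.items).2.getD 0
    else 0             -- KeyError; excluded by Pre_

-- ===== PORT B =====
def nfruits_alt (aDict : List (String × Int)) (string : String) : Int :=
  let body := string.toList.dropLast
  let eaten := body.foldl (fun d c => d.modify (String.singleton c) 0 (· + 1))
                 (PySem.Dict.empty : PySem.Dict String Int)
  let bonus : Int := body.length
  let d0 : PySem.Dict String Int := PySem.Dict.mk aDict
  let d1 := d0.keys.foldl (fun d k => d.modify k 0 (· + (bonus - 2 * eaten.getD k 0))) d0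
  match PySem.List.pyGet? string.toList (-1) with
  | none => 0          -- IndexError (empty string); excluded by Pre_
  | some c =>
    if d1.contains (String.singleton c) then
      let d2 := d1.modify (String.singleton c) 0 (· - 1)
      (PySem.List.max? d2.values (fun v => v)).getD 0
    else 0             -- KeyError; excluded by Pre_

-- ===== PRECONDITION & SPEC =====
-- Pre_ excludes: duplicate keys in the assoc-list rendering of the dict (a real Python dict
-- cannot hold them, so that corner is a representation artefact), the empty string (A raises
-- IndexError) and strings whose last character is not a key (A raises KeyError).
def Pre_nfruits (aDict : List (String × Int)) (string : String) : Prop :=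
  (aDict.map Prod.fst).Nodup ∧
  (match string.toList.getLast? with
   | none => false
   | some c => decide (String.singleton c ∈ aDict.map Prod.fst)) = true
instance (aDict : List (String × Int)) (string : String) : Decidable (Pre_nfruits aDict string) := by
  unfold Pre_nfruits; infer_instance

def pvWitness_nfruits : (List (String × Int)) × String := ([("a", 3), ("b", 2)], "ab")

def Spec_nfruits (aDict : List (String × Int)) (string : String) (out : Int) : Prop := out = nfruits_alt aDict string
instance (aDict : List (String × Int)) (string : String) (out : Int) : Decidable (Spec_nfruits aDict string out) := by unfold Spec_nfruits; infer_instance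

-- ===== CLAIM (what is proved, stated in full; the proofs are below) =====
def Claim_equal_nfruits : Prop := ∀ (aDict : List (String × Int)) (string : String), Dom_nfruits aDict string → Pre_nfruits aDict string → Spec_nfruits aDict string (nfruits aDict string)

-- ===== LEMMAS AND PROOFS =====

-- a loop over the dict's own (distinct) keys, modifying each in place, is a map over the items
theorem foldl_modify_aux (g : String → Int → Int) :
  ∀ (ks : List String) (d : PySem.Dict String Int), ks.Nodup → (∀ k ∈ ks, k ∈ d.keys) → d.keys.Nodup →
    (ks.foldl (fun d k => d.modify k 0 (g k)) d).items
      = d.items.map (fun kv => if kv.1 ∈ ks then (kv.1, g kv.1 kv.2) else kv) := by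
  intro ks
  induction ks with
  | nil => intro d _ _ _; simp
  | cons k ks ih =>
    intro d hnd hsub hkeys
    have hkmem : k ∈ d.keys := hsub k (List.mem_cons_self ..)
    have hcont : d.contains k = true := (PySem.Dict.contains_iff_mem_keys ..).mpr hkmem
    have hmod : (d.modify k 0 (g k)).items
        = d.items.map (fun p => if p.1 == k then (k, g k (d.getD k 0)) else p) := by
      show (d.insert k (g k (d.getD k 0))).items = _
      exact PySem.Dict.items_insert_of_contains d _ hcont
    have hkeys' : (d.modify k 0 (g k)).keys = d.keys := by
      have : (d.modify k 0 (g k)).keys = (d.modify k 0 (g k)).items.map (·.1) := rfl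
      rw [this, hmod, List.map_map]
      apply List.map_congr_left
      intro p _
      by_cases hp : p.1 = k <;> simp [hp]
    rw [List.foldl_cons,
      ih _ (List.nodup_cons.mp hnd).2
        (by intro x hx; rw [hkeys']; exact hsub x (List.mem_cons_of_mem _ hx))
        (by rw [hkeys']; exact hkeys),
      hmod, List.map_map]
    apply List.map_congr_left
    intro p hp
    have hknots : k ∉ ks := (List.nodup_cons.mp hnd).1
    by_cases hpk : p.1 = k
    · have hgd : d.getD k 0 = p.2 := by
        have : (k, p.2) ∈ d.items := by rw [← hpk]; exact hp
        exact PySem.Dict.getD_of_mem_items d this hkeys 0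
      simp [hpk, hknots, hgd]
    · simp [hpk, Function.comp]

theorem foldl_modify_keys_items (g : String → Int → Int) (d : PySem.Dict String Int)
    (h : d.keys.Nodup) :
    (d.keys.foldl (fun d k => d.modify k 0 (g k)) d).items
      = d.items.map (fun kv => (kv.1, g kv.1 kv.2)) := by
  rw [foldl_modify_aux g d.keys d h (fun k hk => hk) h]
  apply List.map_congr_left
  intro p hp
  simp [PySem.Dict.mem_keys_of_mem_items d hp]

theorem innerA_eq (d : PySem.Dict String Int) (c : Char) :
    nfruitsInner d c
      = d.keys.foldl (fun d k => d.modify k 0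
          (fun v => if k == String.singleton c then v - 1 else v + 1)) d := by
  unfold nfruitsInner
  congr 1
  funext d k
  by_cases h : k == String.singleton c <;> simp [h]

theorem foldl_modify_keys (g : String → Int → Int) (d : PySem.Dict String Int)
    (h : d.keys.Nodup) :
    (d.keys.foldl (fun d k => d.modify k 0 (g k)) d).keys = d.keys := by
  show (d.keys.foldl (fun d k => d.modify k 0 (g k)) d).items.map (·.1) = _
  rw [foldl_modify_keys_items g d h, List.map_map]
  rfl

-- A's double loop in closed form: each key ends at v + |cs| - 2 * (occurrences of the key in cs)
theorem outerA (cs : List Char) :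
    ∀ (d : PySem.Dict String Int), d.keys.Nodup →
    (cs.foldl nfruitsInner d).items
      = d.items.map (fun kv =>
          (kv.1, kv.2 + (cs.length : Int) - 2 * ((cs.map String.singleton).count kv.1 : Int))) := by
  induction cs with
  | nil => intro d _; simp
  | cons c cs ih =>
    intro d h
    have hinner := innerA_eq d c
    have hitems := foldl_modify_keys_items
      (fun k v => if k == String.singleton c then v - 1 else v + 1) d h
    have hkeys : (nfruitsInner d c).keys = d.keys := by
      rw [hinner]; exact foldl_modify_keys _ d h
    rw [List.foldl_cons, ih (nfruitsInner d c) (hkeys ▸ h)]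
    rw [hinner, hitems, List.map_map]
    apply List.map_congr_left
    intro p _
    by_cases hpk : p.1 = String.singleton c
    · simp only [Function.comp, hpk, List.map_cons, List.count_cons, List.length_cons,
        beq_self_eq_true, if_true, Prod.mk.injEq, true_and]
      push_cast
      ring
    · have hne : ¬ (String.singleton c == p.1) = true := by simp [Ne.symm hpk]
      simp only [Function.comp, List.map_cons, List.count_cons, List.length_cons, hne,
        beq_iff_eq, if_neg hpk, Prod.mk.injEq, true_and]
      push_cast
      ring

theorem maxLoop_snd (l : List (String × Int)) :
    ∀ (acc : Option String × Option Int),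
    (l.foldl (fun acc fc =>
      match acc.2 with
      | none => (some fc.1, some fc.2)
      | some b => if fc.2 > b then (some fc.1, some fc.2) else acc) acc).2
    = (l.map (·.2)).foldl (fun m v =>
        match m with
        | none => some v
        | some b => if v > b then some v else some b) acc.2 := by
  induction l with
  | nil => intro acc; rfl
  | cons p l ih =>
    intro acc
    rw [List.foldl_cons, List.map_cons, List.foldl_cons, ih]
    congr 1
    rcases acc with ⟨f, m⟩
    cases m with
    | none => rfl
    | some b =>
      simp only
      by_cases h : p.2 > b <;> simp [h]

theorem optfold_max (l : List Int) :
    ∀ (x : Int),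
    l.foldl (fun m v =>
      match m with
      | none => some v
      | some b => if v > b then some v else some b) (some x)
    = some (l.foldl max x) := by
  induction l with
  | nil => intro x; rfl
  | cons v l ih =>
    intro x
    rw [List.foldl_cons, List.foldl_cons]
    have : (if v > x then some v else some x) = some (max x v) := by
      split_ifs with h <;> simp <;> omega
    simp only [this, ih]

theorem pyGet_last (cs : List Char) :
    PySem.List.pyGet? cs ((cs.length : Int) - 1) = PySem.List.pyGet? cs (-1) := by
  cases cs with
  | nil => rfl
  | cons c cs =>
    simp [PySem.List.pyGet?, PySem.List.pyIdx?]

-- A's hand-written max loop computes Python's max(values)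
theorem maxLoop_eq_max? (items : List (String × Int)) :
    (nfruitsMaxLoop items).2.getD 0
      = (PySem.List.max? (items.map (·.2)) (fun v => v)).getD 0 := by
  cases items with
  | nil => rfl
  | cons p rest =>
    unfold nfruitsMaxLoop
    rw [List.foldl_cons]
    show (List.foldl _ (some p.1, some p.2) rest).2.getD 0 = _
    rw [maxLoop_snd, optfold_max, List.map_cons, PySem.List.max?_id_cons]

-- B's tally dict holds the occurrence count of each (singleton) key
theorem eaten_getD (body : List Char) (k : String) :
    (body.foldl (fun d c => d.modify (String.singleton c) 0 (· + 1))
      (PySem.Dict.empty : PySem.Dict String Int)).getD k 0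
    = ((body.map String.singleton).count k : Int) := by
  have h : body.foldl (fun d c => d.modify (String.singleton c) 0 (· + 1))
      (PySem.Dict.empty : PySem.Dict String Int)
      = (body.map String.singleton).foldl (fun d s => d.modify s 0 (· + 1)) PySem.Dict.empty := by
    rw [List.foldl_map]
  rw [h, PySem.Dict.getD_foldl_modify_add_one]
  simp

theorem nfruits_eq_alt (aDict : List (String × Int)) (string : String)
    (hnd : (aDict.map Prod.fst).Nodup) :
    nfruits aDict string = nfruits_alt aDict string := by
  simp only [nfruits, nfruits_alt]
  have hk0 : (PySem.Dict.mk aDict).keys.Nodup := by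
    rw [PySem.Dict.keys_mk]; exact hnd
  have hbody : string.toList.dropLast = string.toList.take (string.toList.length - 1) :=
    List.dropLast_eq_take
  have hd1 : (string.toList.take (string.toList.length - 1)).foldl nfruitsInner (PySem.Dict.mk aDict)
      = (PySem.Dict.mk aDict).keys.foldl
          (fun d k => d.modify k 0 (· + (((string.toList.dropLast.length : Int))
            - 2 * ((string.toList.dropLast.foldl
                (fun d c => d.modify (String.singleton c) 0 (· + 1))
                (PySem.Dict.empty : PySem.Dict String Int)).getD k 0))))
          (PySem.Dict.mk aDict) := by
    apply PySem.Dict.ext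
    rw [outerA _ _ hk0, foldl_modify_keys_items _ _ hk0]
    apply List.map_congr_left
    intro p _
    rw [eaten_getD, hbody]
    simp only [Prod.mk.injEq, true_and]
    ring
  rw [pyGet_last, hd1]
  cases h : PySem.List.pyGet? string.toList (-1) with
  | none => rfl
  | some c =>
    simp only
    split
    · rw [maxLoop_eq_max?]
      rfl
    · rfl

-- ===== VERDICT (by name: the statement is the Claim_ definition above) =====
theorem nfruits_spec : Claim_equal_nfruits := by
  intro aDict string _ hpre
  unfold Spec_nfruits
  exact nfruits_eq_alt aDict string hpre.1
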